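-- pv_equiv track=rewrite | github.com/LHCrossings/ctv-orderentry | browser_automation/parsers/worldlink_parser.py | _format_day_ranges
-- ===== SOURCE A (Python) =====
-- def _format_day_ranges(active_days, day_abbrev):
--     """
--     Format list of day indices into readable range format
--
--     Examples:
--         [0,1,2] → "M-W"
--         [0,1,3,4] → "M-Tu,Th-F"
--         [0,2,4,6] → "M,W,F,Su"
--     """
--     if not active_days:
--         return 'M-Su'
--
--     ranges = []
--     start = active_days[0]
--     end = active_days[0]
--
--     for i in range(1, len(active_days)):
--         if active_days[i] == end + 1:
--             # Consecutive day, extend range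
--             end = active_days[i]
--         else:
--             # Gap found, save current range and start new one
--             ranges.append((start, end))
--             start = active_days[i]
--             end = active_days[i]
--
--     # Add final range
--     ranges.append((start, end))
--
--     # Format ranges
--     formatted = []
--     for start, end in ranges:
--         if start == end:
--             # Single day
--             formatted.append(day_abbrev[start])
--         else:
--             # Range
--             formatted.append(f"{day_abbrev[start]}-{day_abbrev[end]}")
--
--     return ','.join(formatted)
-- ===== SOURCE B (Python) =====
-- def _format_day_ranges(active_days, day_abbrev):
--     if not active_days:
--         return 'M-Su'
--     # split off the maximal consecutive prefix, format it, recurse on the rest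
--     k = next((i for i, (a, b) in enumerate(zip(active_days, active_days[1:]))
--               if b != a + 1), len(active_days) - 1) + 1
--     head, tail = active_days[:k], active_days[k:]
--     s, e = head[0], head[-1]
--     piece = day_abbrev[s] if s == e else f"{day_abbrev[s]}-{day_abbrev[e]}"
--     return piece if not tail else piece + ',' + _format_day_ranges(tail, day_abbrev)
-- ===== Notes on version B (the rewrite author's own statement) =====
-- stated objective: alternative
-- what changed: Replaces A's two staged passes (a stateful start/end loop that builds a ranges list, then a formatting loop over it) by direct recursion on the list: locate the first gap position, slice off the maximal consecutive prefix, format it immediately, and recurse on the remainder, building the string without any intermediate ranges list.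
import Mathlib
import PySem

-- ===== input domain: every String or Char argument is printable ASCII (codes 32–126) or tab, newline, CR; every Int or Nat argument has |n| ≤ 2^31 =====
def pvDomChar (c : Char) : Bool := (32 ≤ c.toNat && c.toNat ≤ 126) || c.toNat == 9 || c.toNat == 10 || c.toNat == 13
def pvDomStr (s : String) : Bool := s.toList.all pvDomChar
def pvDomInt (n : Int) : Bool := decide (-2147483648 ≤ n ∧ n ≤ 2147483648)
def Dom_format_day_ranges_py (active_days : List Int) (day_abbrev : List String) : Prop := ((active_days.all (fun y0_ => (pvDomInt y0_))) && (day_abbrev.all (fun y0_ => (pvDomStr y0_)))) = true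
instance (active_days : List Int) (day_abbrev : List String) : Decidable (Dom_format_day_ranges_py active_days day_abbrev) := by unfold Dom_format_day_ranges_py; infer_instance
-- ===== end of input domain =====

-- B replaces A's two staged passes (a stateful start/end loop building a ranges list, then a
-- formatting loop over it) by direct recursion: split off the maximal consecutive prefix via the
-- first-gap position, format it at once, recurse on the remainder (alternative, same cost).

-- ===== PORT A =====
-- A's range-building loop: state (start, end), scanning the remaining days
def aRanges (start e : Int) : List Int → List (Int × Int)
  | [] => [(start, e)]
  | d :: rest =>
      if d = e + 1 then aRanges start d rest
      else (start, e) :: aRanges d d rest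

-- A's formatting loop body
def aFmt (day_abbrev : List String) (p : Int × Int) : String :=
  if p.1 = p.2 then (PySem.List.pyGet? day_abbrev p.1).getD ""
  else (PySem.List.pyGet? day_abbrev p.1).getD "" ++ "-" ++ (PySem.List.pyGet? day_abbrev p.2).getD ""

def format_day_ranges_py (active_days : List Int) (day_abbrev : List String) : String :=
  match active_days with
  | [] => "M-Su"
  | d :: rest => PySem.Str.join "," ((aRanges d d rest).map (aFmt day_abbrev))

-- ===== PORT B =====
-- next((i for i, (a, b) in enumerate(zip(l, l[1:])) if b != a + 1), ...): first index whose pair breaks +1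
def bFirstGap : List (Int × Int) → Int → Option Int
  | [], _ => none
  | (a, b) :: rest, i => if b ≠ a + 1 then some i else bFirstGap rest (i + 1)

-- needed by the port's termination proof: the split point k is at least 1
lemma bFirstGap_nonneg : ∀ (ps : List (Int × Int)) (i : Int), 0 ≤ i →
    0 ≤ (bFirstGap ps i).getD 0 := by
  intro ps
  induction ps with
  | nil => intro i h; simpa [bFirstGap] using h
  | cons p rest ih =>
      intro i h
      obtain ⟨a, b⟩ := p
      simp only [bFirstGap]
      split
      · simpa using h
      · exact ih (i + 1) (by omega)

def format_day_ranges_py_alt (active_days : List Int) (day_abbrev : List String) : String :=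
  if hne : active_days = [] then "M-Su"
  else
    let k : Int :=
      (bFirstGap (active_days.zip (PySem.List.slice active_days (some 1) none)) 0).getD
        (PySem.List.len active_days - 1) + 1
    let head := PySem.List.slice active_days none (some k)
    let tail := PySem.List.slice active_days (some k) none
    let s := (PySem.List.pyGet? head 0).getD 0
    let e := (PySem.List.pyGet? head (-1)).getD 0
    let piece :=
      if s = e then (PySem.List.pyGet? day_abbrev s).getD ""
      else (PySem.List.pyGet? day_abbrev s).getD "" ++ "-" ++ (PySem.List.pyGet? day_abbrev e).getD ""
    if tail = [] then piece
    else piece ++ "," ++ format_day_ranges_py_alt tail day_abbrev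
termination_by active_days.length
decreasing_by
  have hk : (0:Int) ≤ (bFirstGap (active_days.zip (PySem.List.slice active_days (some 1) none)) 0).getD
      (PySem.List.len active_days - 1) := by
    rcases h : bFirstGap (active_days.zip (PySem.List.slice active_days (some 1) none)) 0 with _ | v
    · simp only [Option.getD_none, PySem.List.len_eq]
      have : 0 < active_days.length := List.length_pos_of_ne_nil hne
      omega
    · have := bFirstGap_nonneg (active_days.zip (PySem.List.slice active_days (some 1) none)) 0 le_rfl
      rw [h] at this
      simpa using this
  have h1 : (0:Int) ≤ (bFirstGap (active_days.zip (PySem.List.slice active_days (some 1) none)) 0).getD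
      (PySem.List.len active_days - 1) + 1 := by omega
  simp only [PySem.List.slice_from _ h1]
  have hlen : 0 < active_days.length := List.length_pos_of_ne_nil hne
  have : 1 ≤ ((bFirstGap (active_days.zip (PySem.List.slice active_days (some 1) none)) 0).getD
      (PySem.List.len active_days - 1) + 1).toNat := by omega
  simp only [List.length_drop]
  omega

-- ===== PRECONDITION & SPEC =====
-- Pre_ excludes exactly the inputs on which Python A raises IndexError: some day index
-- outside [-len(day_abbrev), len(day_abbrev)).
def Pre_format_day_ranges_py (active_days : List Int) (day_abbrev : List String) : Prop :=
  ∀ d ∈ active_days, PySem.Raise.InRange day_abbrev.length d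
instance (active_days : List Int) (day_abbrev : List String) : Decidable (Pre_format_day_ranges_py active_days day_abbrev) := by unfold Pre_format_day_ranges_py; infer_instance
def pvWitness_format_day_ranges_py : List Int × List String := ([0, 1, 3], ["M", "Tu", "W", "Th"])

def Spec_format_day_ranges_py (active_days : List Int) (day_abbrev : List String) (out : String) : Prop := out = format_day_ranges_py_alt active_days day_abbrev
instance (active_days : List Int) (day_abbrev : List String) (out : String) : Decidable (Spec_format_day_ranges_py active_days day_abbrev out) := by unfold Spec_format_day_ranges_py; infer_instance

-- ===== CLAIM (what is proved, stated in full; the proofs are below) =====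
def Claim_equal_format_day_ranges_py : Prop := ∀ (active_days : List Int) (day_abbrev : List String), Dom_format_day_ranges_py active_days day_abbrev → Pre_format_day_ranges_py active_days day_abbrev → Spec_format_day_ranges_py active_days day_abbrev (format_day_ranges_py active_days day_abbrev)

-- ===== LEMMAS AND PROOFS =====

-- proof-side Nat version of bFirstGap
def ngap : List (Int × Int) → Option Nat
  | [] => none
  | (a, b) :: rest => if b ≠ a + 1 then some 0 else (ngap rest).map (· + 1)

lemma bFirstGap_eq_ngap : ∀ (ps : List (Int × Int)) (i : Int),
    bFirstGap ps i = (ngap ps).map (fun n : Nat => i + n) := by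
  intro ps
  induction ps with
  | nil => intro i; simp [bFirstGap, ngap]
  | cons p rest ih =>
      intro i
      obtain ⟨a, b⟩ := p
      simp only [bFirstGap, ngap]
      split
      · simp
      · rw [ih (i + 1)]
        cases ngap rest <;> (simp; try omega)

-- the Nat split point of B on a nonempty list
def K (l : List Int) : Nat := (ngap (l.zip l.tail)).getD (l.length - 1) + 1

lemma K_pos (l : List Int) : 1 ≤ K l := by simp [K]

-- B's Int split point equals (K l : Int) on a nonempty list
lemma k_eq_K (l : List Int) (h : l ≠ []) :
    (bFirstGap (l.zip (PySem.List.slice l (some 1) none)) 0).getD (PySem.List.len l - 1) + 1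
      = (K l : Int) := by
  have hl : 1 ≤ l.length := List.length_pos_of_ne_nil h
  rw [PySem.List.slice_from_one, bFirstGap_eq_ngap, PySem.List.len_eq]
  unfold K
  rcases ngap (l.zip l.tail) with _ | n
  · simp; omega
  · simp

-- A's ranges list decomposes at B's split point
lemma aRanges_split : ∀ (rest : List Int) (s e : Int),
    aRanges s e rest =
      (s, (((e :: rest).take (K (e :: rest))).getLast?).getD 0) ::
      (match (e :: rest).drop (K (e :: rest)) with
       | [] => []
       | h :: t => aRanges h h t) := by
  intro rest
  induction rest with
  | nil =>
      intro s e
      simp [aRanges, K, ngap]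
  | cons d rest' ih =>
      intro s e
      by_cases hd : d = e + 1
      · -- consecutive: K (e :: d :: rest') = K (d :: rest') + 1
        have hK : K (e :: d :: rest') = K (d :: rest') + 1 := by
          unfold K
          simp only [List.tail_cons, List.zip_cons_cons]
          rw [show ngap ((e, d) :: (d :: rest').zip rest')
              = (ngap ((d :: rest').zip rest')).map (· + 1) by
            simp [ngap, hd]]
          rcases ngap ((d :: rest').zip rest') with _ | n <;> simp
        have htake : (e :: d :: rest').take (K (e :: d :: rest'))
            = e :: (d :: rest').take (K (d :: rest')) := by
          rw [hK]; rfl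
        have hdrop : (e :: d :: rest').drop (K (e :: d :: rest'))
            = (d :: rest').drop (K (d :: rest')) := by
          rw [hK]; rfl
        have hne : (d :: rest').take (K (d :: rest')) ≠ [] := by
          have := K_pos (d :: rest')
          cases hK' : K (d :: rest') with
          | zero => omega
          | succ m => simp [List.take_succ_cons]
        have hlast : ((e :: d :: rest').take (K (e :: d :: rest'))).getLast?
            = ((d :: rest').take (K (d :: rest'))).getLast? := by
          rw [htake]
          rcases hx : (d :: rest').take (K (d :: rest')) with _ | ⟨x, xs⟩
          · exact absurd hx hne
          · simp [List.getLast?_cons_cons]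
        simp only [aRanges, if_pos hd, hlast, hdrop]
        exact ih s d
      · -- gap at the first pair: K = 1
        have hK : K (e :: d :: rest') = 1 := by
          unfold K
          simp [ngap, hd]
        simp [aRanges, hd, hK]
  -- (match on drop 1 yields aRanges d d rest')

-- Str.join facts lifted from PySem.Chars
lemma str_join_singleton (sep x : String) : PySem.Str.join sep [x] = x := by
  apply String.toList_inj.mp
  simp [PySem.Str.join, PySem.Chars.join_singleton]

lemma str_join_cons_cons (sep p q : String) (rest : List String) :
    PySem.Str.join sep (p :: q :: rest) = p ++ sep ++ PySem.Str.join sep (q :: rest) := by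
  apply String.toList_inj.mp
  simp [PySem.Str.join, PySem.Chars.join_cons_cons]

lemma aRanges_ne_nil : ∀ (rest : List Int) (s e : Int), aRanges s e rest ≠ [] := by
  intro rest
  induction rest with
  | nil => intro s e; simp [aRanges]
  | cons d rest' ih =>
      intro s e
      simp only [aRanges]
      split
      · exact ih s d
      · simp

-- main agreement, by strong induction on the length of active_days
lemma main_agree (ab : List String) : ∀ (n : Nat) (l : List Int), l.length ≤ n →
    format_day_ranges_py l ab = format_day_ranges_py_alt l ab := by
  intro n
  induction n with
  | zero =>
      intro l hl
      have : l = [] := List.eq_nil_of_length_eq_zero (by omega)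
      subst this
      rw [format_day_ranges_py_alt]
      rfl
  | succ m ih =>
      intro l hl
      rcases hcase : l with _ | ⟨d, rest⟩
      · rw [format_day_ranges_py_alt]
        rfl
      subst hcase
      have hne : (d :: rest : List Int) ≠ [] := by simp
      -- unfold B one step
      rw [format_day_ranges_py_alt]
      rw [dif_neg hne]
      rw [k_eq_K _ hne]
      simp only [PySem.List.slice_to_natCast, PySem.List.slice_from_natCast]
      -- B's head[0] is d, head[-1] is the run's last element
      have hKpos := K_pos (d :: rest)
      have hhead0 : (PySem.List.pyGet? ((d :: rest).take (K (d :: rest))) 0).getD 0 = d := by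
        cases hK : K (d :: rest) with
        | zero => omega
        | succ k => simp [List.take_succ_cons]
      have hheadlast : (PySem.List.pyGet? ((d :: rest).take (K (d :: rest))) (-1)).getD 0
          = (((d :: rest).take (K (d :: rest))).getLast?).getD 0 := by
        rw [PySem.List.pyGet?_neg_one]
      rw [hhead0, hheadlast]
      -- unfold A via the split lemma
      simp only [format_day_ranges_py]
      rw [aRanges_split rest d d]
      rcases hdrop : (d :: rest).drop (K (d :: rest)) with _ | ⟨h, t⟩
      · simp [str_join_singleton, aFmt]
      · have hdne : (h :: t : List Int) ≠ [] := by simp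
        simp only [if_neg hdne]
        have hnn := aRanges_ne_nil t h h
        rcases hr : aRanges h h t with _ | ⟨r0, rs⟩
        · exact absurd hr hnn
        · rw [← hr]
          have hmap : (aRanges h h t).map (aFmt ab) = aFmt ab r0 :: rs.map (aFmt ab) := by
            rw [hr]; rfl
          rw [List.map_cons, hmap, str_join_cons_cons, ← hmap]
          have hlen : (h :: t).length ≤ m := by
            have h2 : (h :: t).length = (d :: rest).length - K (d :: rest) := by
              rw [← hdrop, List.length_drop]
            simp only [List.length_cons] at h2 hl ⊢
            omega
          have hB := ih (h :: t) hlen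
          simp only [format_day_ranges_py] at hB
          rw [hB]
          simp [aFmt]

-- ===== VERDICT (by name: the statement is the Claim_ definition above) =====
theorem format_day_ranges_py_spec : Claim_equal_format_day_ranges_py := by
  intro active_days day_abbrev _ _
  unfold Spec_format_day_ranges_py
  exact main_agree day_abbrev active_days.length active_days le_rfl
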